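-- pv_equiv track=rewrite | github.com/sbpark0611/ram_transformer | envs/radial_arm_maze.py | _sum_min_actions
-- ===== SOURCE A (Python) =====
-- def _min_actions(x1, y1, x2, y2, K):
--     dx = min(abs(x1 - x2), K - abs(x1 - x2))
--     dy = min(abs(y1 - y2), K - abs(y1 - y2))
--     min_steps = dx + dy
--     return min_steps + 1
--
-- def _sum_min_actions(K):
--     total_min_actions = 0
--     for x1 in range(K):
--         for y1 in range(K):
--             for x2 in range(K):
--                 for y2 in range(K):
--                     if x1 != x2 or y1 != y2:
--                         total_min_actions += _min_actions(x1, y1, x2, y2, K)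
--     return total_min_actions
-- ===== SOURCE B (Python) =====
-- def _sum_min_actions(K):
--     # Closed-form combination: separate the toroidal x- and y-distance sums.
--     # For each fixed coordinate, sum of circular distances over one axis is
--     # T = sum(min(d, K - d) for d in range(K)) independent of the start cell,
--     # so the full pair sum is 2*K^3*T + K^4 - K^2 (subtracting the K^2 equal pairs).
--     if K <= 0:
--         return 0
--     T = 0
--     for d in range(K):
--         T += min(d, K - d)
--     return 2 * K * K * K * T + K ** 4 - K * K
-- ===== Notes on version B (the rewrite author's own statement) =====
-- stated objective: faster
-- what changed: Replaces A's quadruple loop over all cell pairs by a single linear loop computing the per-axis toroidal distance sum T, combined in closed form as twice K-cubed times T plus K-fourth minus K-squared.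
import Mathlib
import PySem

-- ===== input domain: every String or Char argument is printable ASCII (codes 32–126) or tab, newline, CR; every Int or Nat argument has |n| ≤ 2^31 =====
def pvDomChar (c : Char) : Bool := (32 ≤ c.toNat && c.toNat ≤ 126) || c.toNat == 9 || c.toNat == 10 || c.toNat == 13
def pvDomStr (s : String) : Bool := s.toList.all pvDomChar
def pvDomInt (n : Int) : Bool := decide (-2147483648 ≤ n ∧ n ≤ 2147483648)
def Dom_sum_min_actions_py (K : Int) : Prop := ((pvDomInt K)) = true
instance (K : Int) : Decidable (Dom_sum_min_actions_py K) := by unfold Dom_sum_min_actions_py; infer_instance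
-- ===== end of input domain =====

-- B replaces A's O(K^4) quadruple loop by one O(K) loop (per-axis toroidal distance sum T)
-- plus the closed-form combination 2*K^3*T + K^4 - K^2  (objective: faster).

-- ===== PORT A =====
def min_actions_py (x1 y1 x2 y2 K : Int) : Int :=
  let dx := min |x1 - x2| (K - |x1 - x2|)
  let dy := min |y1 - y2| (K - |y1 - y2|)
  let min_steps := dx + dy
  min_steps + 1

def sum_min_actions_py (K : Int) : Int :=
  (PySem.List.pyRange 0 K 1).foldl (fun t1 x1 =>
    (PySem.List.pyRange 0 K 1).foldl (fun t2 y1 =>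
      (PySem.List.pyRange 0 K 1).foldl (fun t3 x2 =>
        (PySem.List.pyRange 0 K 1).foldl (fun t4 y2 =>
          if x1 ≠ x2 ∨ y1 ≠ y2 then t4 + min_actions_py x1 y1 x2 y2 K else t4)
          t3)
        t2)
      t1)
    0

-- ===== PORT B =====
def sum_min_actions_py_alt (K : Int) : Int :=
  if K ≤ 0 then 0
  else
    let T := (PySem.List.pyRange 0 K 1).foldl (fun t d => t + min d (K - d)) 0
    2 * K * K * K * T + K ^ 4 - K * K

-- ===== PRECONDITION & SPEC =====
def Spec_sum_min_actions_py (K : Int) (out : Int) : Prop := out = sum_min_actions_py_alt K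
instance (K : Int) (out : Int) : Decidable (Spec_sum_min_actions_py K out) := by unfold Spec_sum_min_actions_py; infer_instance

-- ===== CLAIM (what is proved, stated in full; the proofs are below) =====
def Claim_equal_sum_min_actions_py : Prop := ∀ (K : Int), Dom_sum_min_actions_py K → Spec_sum_min_actions_py K (sum_min_actions_py K)

-- ===== LEMMAS AND PROOFS =====

-- circular distance used by A
def pvG (K a : Int) : Int := min |a| (K - |a|)

lemma pv_foldl_ite_add_sum (p : Int → Prop) [DecidablePred p] (t : Int → Int) :
    ∀ (l : List Int) (a : Int),
      l.foldl (fun acc x => if p x then acc + t x else acc) a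
        = a + (l.map (fun x => if p x then t x else 0)).sum := by
  intro l
  induction l with
  | nil => intro a; simp
  | cons x xs ih =>
      intro a
      simp only [List.foldl_cons, List.map_cons, List.sum_cons, ih]
      split_ifs <;> ring

lemma pv_listsum_range (n : ℕ) (f : ℕ → ℤ) :
    ((List.range n).map f).sum = ∑ i ∈ Finset.range n, f i := by
  induction n with
  | zero => simp
  | succ n ih =>
      rw [List.range_succ, Finset.sum_range_succ, List.map_append, List.sum_append, ih]
      simp

lemma pv_pyRangeSum (K : Int) (f : Int → Int) :
    ((PySem.List.pyRange 0 K 1).map f).sum = ∑ i ∈ Finset.range K.toNat, f (i : Int) := by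
  rw [PySem.List.pyRange_one, List.map_map, pv_listsum_range]
  simp [Function.comp]

-- the per-axis shift invariance: summing circular distances from any cell gives the same total
lemma pv_shift (K : Int) (hK : 0 < K) (x1 : ℕ) (hx : x1 < K.toNat) :
    ∑ x2 ∈ Finset.range K.toNat, pvG K ((x1 : Int) - (x2 : Int))
      = ∑ d ∈ Finset.range K.toNat, pvG K (d : Int) := by
  have hn : (K.toNat : Int) = K := Int.toNat_of_nonneg (le_of_lt hK)
  refine Finset.sum_nbij' (fun x2 => if x2 ≤ x1 then x1 - x2 else x1 + K.toNat - x2)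
    (fun d => if d ≤ x1 then x1 - d else x1 + K.toNat - d) ?_ ?_ ?_ ?_ ?_
  · intro a ha; simp only [Finset.mem_range] at *; split_ifs <;> omega
  · intro a ha; simp only [Finset.mem_range] at *; split_ifs <;> omega
  · intro a ha; simp only [Finset.mem_range] at ha; dsimp only; split_ifs <;> omega
  · intro a ha; simp only [Finset.mem_range] at ha; dsimp only; split_ifs <;> omega
  · intro a ha
    simp only [Finset.mem_range] at ha
    dsimp only
    by_cases h : a ≤ x1
    · rw [if_pos h]
      have : ((x1 - a : ℕ) : ℤ) = (x1 : ℤ) - a := by omega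
      rw [this]
    · rw [if_neg h]
      have hc : ((x1 + K.toNat - a : ℕ) : ℤ) = (x1 : ℤ) + K - a := by omega
      rw [hc]
      unfold pvG
      have h1 : |(x1 : ℤ) - a| = (a : ℤ) - x1 := by rw [abs_of_nonpos (by omega)]; ring
      have h2 : |(x1 : ℤ) + K - a| = (x1 : ℤ) + K - a := by rw [abs_of_nonneg (by omega)]
      rw [h1, h2]
      have : (x1 : ℤ) + K - a = K - ((a : ℤ) - x1) := by ring
      rw [this]
      have : K - (K - ((a : ℤ) - x1)) = (a : ℤ) - x1 := by ring
      rw [this, min_comm]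

lemma pv_sumT (K : Int) :
    ∑ d ∈ Finset.range K.toNat, pvG K (d : Int)
      = ∑ d ∈ Finset.range K.toNat, min (d : Int) (K - d) := by
  refine Finset.sum_congr rfl ?_
  intro d hd
  simp only [Finset.mem_range] at hd
  unfold pvG
  rw [abs_of_nonneg (by positivity)]

lemma pv_diag (n : ℕ) (x1 y1 : ℕ) (hx : x1 < n) (hy : y1 < n) (t : ℕ → ℕ → ℤ) :
    ∑ x2 ∈ Finset.range n, ∑ y2 ∈ Finset.range n,
        (if (x1 : ℤ) = x2 ∧ (y1 : ℤ) = y2 then t x2 y2 else 0)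
      = t x1 y1 := by
  have hcond : ∀ x2 y2 : ℕ, (((x1 : ℤ) = x2 ∧ (y1 : ℤ) = y2) ↔ (x2 = x1 ∧ y2 = y1)) := by
    intro x2 y2
    constructor
    · rintro ⟨h1, h2⟩; exact ⟨by exact_mod_cast h1.symm, by exact_mod_cast h2.symm⟩
    · rintro ⟨h1, h2⟩; subst h1; subst h2; exact ⟨rfl, rfl⟩
  calc ∑ x2 ∈ Finset.range n, ∑ y2 ∈ Finset.range n,
          (if (x1 : ℤ) = x2 ∧ (y1 : ℤ) = y2 then t x2 y2 else 0)
      = ∑ x2 ∈ Finset.range n, ∑ y2 ∈ Finset.range n,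
          (if x2 = x1 ∧ y2 = y1 then t x2 y2 else 0) := by
        refine Finset.sum_congr rfl fun x2 _ => Finset.sum_congr rfl fun y2 _ => ?_
        simp only [hcond]
    _ = t x1 y1 := by
        rw [Finset.sum_comm]
        rw [Finset.sum_eq_single y1]
        · rw [Finset.sum_eq_single x1]
          · simp
          · intro b _ hb; simp [hb]
          · intro h; exact absurd (Finset.mem_range.mpr hx) h
        · intro b _ hb
          apply Finset.sum_eq_zero
          intro x2 _
          simp [hb]
        · intro h; exact absurd (Finset.mem_range.mpr hy) h

theorem pv_main : ∀ (K : Int), sum_min_actions_py K = sum_min_actions_py_alt K := by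
  intro K
  by_cases hK : K ≤ 0
  · unfold sum_min_actions_py sum_min_actions_py_alt
    rw [PySem.List.pyRange_one_eq_nil (by omega)]
    simp [hK]
  · push Not at hK
    have hn : (K.toNat : Int) = K := Int.toNat_of_nonneg (le_of_lt hK)
    set n := K.toNat with hndef
    -- evaluate A's nested loops as nested sums
    unfold sum_min_actions_py
    simp only [pv_foldl_ite_add_sum (fun y2 => _ ≠ _ ∨ _ ≠ y2) _, PySem.List.foldl_add,
      zero_add]
    simp only [pv_pyRangeSum]
    -- evaluate B
    unfold sum_min_actions_py_alt
    rw [if_neg (by omega)]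
    rw [PySem.List.foldl_add, zero_add, pv_pyRangeSum]
    set T : ℤ := ∑ d ∈ Finset.range n, min (d : Int) (K - d) with hT
    -- the inner double sum is constant in (x1, y1)
    have hterm : ∀ x1 y1 x2 y2 : ℤ, min_actions_py x1 y1 x2 y2 K
        = pvG K (x1 - x2) + pvG K (y1 - y2) + 1 := by
      intro _ _ _ _; rfl
    have hinner : ∀ x1 y1 : ℕ, x1 < n → y1 < n →
        (∑ x2 ∈ Finset.range n, ∑ y2 ∈ Finset.range n,
          (if (x1 : ℤ) ≠ x2 ∨ (y1 : ℤ) ≠ y2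
            then min_actions_py x1 y1 x2 y2 K else 0))
        = 2 * n * T + n * n - 1 := by
      intro x1 y1 hx hy
      have hsplit : ∀ x2 y2 : ℕ,
          (if (x1 : ℤ) ≠ x2 ∨ (y1 : ℤ) ≠ y2 then min_actions_py x1 y1 x2 y2 K else 0)
            = min_actions_py x1 y1 x2 y2 K
              - (if (x1 : ℤ) = x2 ∧ (y1 : ℤ) = y2 then min_actions_py x1 y1 x2 y2 K else 0) := by
        intro x2 y2
        by_cases h : (x1 : ℤ) = x2 ∧ (y1 : ℤ) = y2
        · rw [if_neg (by tauto), if_pos h]; ring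
        · rw [if_pos (by tauto), if_neg h]; ring
      simp only [hsplit, Finset.sum_sub_distrib]
      rw [pv_diag n x1 y1 hx hy (fun x2 y2 => min_actions_py x1 y1 x2 y2 K)]
      have hdiagval : min_actions_py (x1 : ℤ) y1 x1 y1 K = 1 := by
        rw [hterm]
        unfold pvG
        simp [abs_of_nonneg, min_eq_left (le_of_lt hK)]
      rw [hdiagval]
      have hfull : ∑ x2 ∈ Finset.range n, ∑ y2 ∈ Finset.range n,
          min_actions_py (x1 : ℤ) y1 x2 y2 K = 2 * n * T + n * n := by
        have hx2 : ∑ x2 ∈ Finset.range n, pvG K ((x1 : ℤ) - x2) = T := by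
          rw [pv_shift K hK x1 hx, pv_sumT K]
        have hy2 : ∑ y2 ∈ Finset.range n, pvG K ((y1 : ℤ) - y2) = T := by
          rw [pv_shift K hK y1 hy, pv_sumT K]
        calc ∑ x2 ∈ Finset.range n, ∑ y2 ∈ Finset.range n, min_actions_py (x1 : ℤ) y1 x2 y2 K
            = ∑ x2 ∈ Finset.range n,
                (n * pvG K ((x1 : ℤ) - x2) + T + n) := by
              refine Finset.sum_congr rfl fun x2 _ => ?_
              simp only [hterm]
              rw [Finset.sum_add_distrib, Finset.sum_add_distrib, hy2]
              simp [Finset.sum_const, mul_comm]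
          _ = n * T + n * T + n * n := by
              rw [Finset.sum_add_distrib, Finset.sum_add_distrib, ← Finset.mul_sum, hx2]
              simp [Finset.sum_const]
          _ = 2 * n * T + n * n := by ring
      rw [hfull]
    calc ∑ x1 ∈ Finset.range n, ∑ y1 ∈ Finset.range n, ∑ x2 ∈ Finset.range n,
            ∑ y2 ∈ Finset.range n,
            (if (x1 : ℤ) ≠ x2 ∨ (y1 : ℤ) ≠ y2 then min_actions_py x1 y1 x2 y2 K else 0)
        = ∑ x1 ∈ Finset.range n, ∑ y1 ∈ Finset.range n, (2 * n * T + n * n - 1) := by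
          refine Finset.sum_congr rfl fun x1 hx1 => Finset.sum_congr rfl fun y1 hy1 => ?_
          exact hinner x1 y1 (Finset.mem_range.mp hx1) (Finset.mem_range.mp hy1)
      _ = (n : ℤ) * (n * (2 * n * T + n * n - 1)) := by
          simp [Finset.sum_const]
          ring
      _ = 2 * K * K * K * T + K ^ 4 - K * K := by
          rw [← hn]; ring

-- ===== VERDICT (by name: the statement is the Claim_ definition above) =====
theorem sum_min_actions_py_spec : Claim_equal_sum_min_actions_py := by
  intro K _
  unfold Spec_sum_min_actions_py
  exact pv_main K
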